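-- pv_equiv track=rewrite | github.com/HanSeongDeok/before-dinner-algorithm | programmers/han/week12/week12 - 푸드 파이트 대회.py | solution
-- ===== SOURCE A (Python) =====
-- def solution(food):
--     answer = []
--     for i in range(1, len(food)):
--         cnt = 0
--         while(cnt < int(food[i]/2)):
--             answer.append(i)
--             cnt += 1
--     return ''.join(map(str, answer)) + '0' + ''.join(map(str, sorted(answer, reverse=True)))
-- ===== SOURCE B (Python) =====
-- def solution(food):
--     parts = ['0']
--     for i in reversed(range(1, len(food))):
--         run = str(i) * (food[i] // 2)
--         parts = [run] + parts + [run]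
--     return ''.join(parts)
-- ===== Notes on version B (the rewrite author's own statement) =====
-- stated objective: faster
-- what changed: B builds the palindrome inside-out: starting from ['0'] it wraps each index's digit-run (made once by bulk string repetition) around a parts list while iterating indices in descending order and joins once at the end — no per-element counting loop, no element list and no descending sort; A appends each index food[i]//2 times to a list, joins it, and sorts that list descending for the right half.
import Mathlib
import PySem

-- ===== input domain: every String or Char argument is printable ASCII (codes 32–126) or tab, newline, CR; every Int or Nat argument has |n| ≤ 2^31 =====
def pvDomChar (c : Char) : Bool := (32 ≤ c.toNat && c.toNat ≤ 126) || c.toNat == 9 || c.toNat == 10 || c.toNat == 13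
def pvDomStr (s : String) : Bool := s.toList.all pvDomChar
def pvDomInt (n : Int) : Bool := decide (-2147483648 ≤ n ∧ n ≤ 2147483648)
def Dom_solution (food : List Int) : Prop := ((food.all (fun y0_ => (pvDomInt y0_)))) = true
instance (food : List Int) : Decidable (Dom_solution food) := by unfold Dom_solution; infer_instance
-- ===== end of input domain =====

-- B builds the palindrome inside-out, wrapping each index's digit-run around the
-- accumulator from the last index to the first; no element list, no join, no sort.

-- ===== PORT A =====
-- int(food[i]/2) truncates toward zero; on |food[i]| ≤ 2^31 the float division by 2 is exact,
-- so it equals Int.tdiv food[i] 2.  The loop 'cnt = 0; while cnt < k: answer.append(i); cnt += 1'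
-- appends i exactly k times when k > 0 and never otherwise, i.e. List.replicate k.toNat i.
-- Indices i of range(1, len(food)) are always in range, so food[i] is PySem.List.pyGetD food i 0.
def solution (food : List Int) : String :=
  let answer : List Int :=
    (PySem.List.pyRange 1 (food.length : Int) 1).foldl
      (fun acc i => acc ++ List.replicate ((PySem.List.pyGetD food i 0).tdiv 2).toNat i) []
  PySem.Str.join "" (answer.map PySem.Int.toStr) ++ "0" ++
    PySem.Str.join "" ((PySem.List.sorted answer (fun x => x) true).map PySem.Int.toStr)

-- ===== PORT B =====
-- s * k in Python: '' when k ≤ 0, else s repeated k times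
def strMul (s : String) (k : Int) : String := PySem.Str.join "" (List.replicate k.toNat s)

-- 'for i in reversed(range(1, len(food))): parts = [run] + parts + [run]' is a foldl over
-- the reversed range carrying the parts list; join once at the end.
def solution_alt (food : List Int) : String :=
  PySem.Str.join ""
    ((PySem.List.pyRange 1 (food.length : Int) 1).reverse.foldl
      (fun ps i =>
        let run := strMul (PySem.Int.toStr i) (PySem.Int.floordiv (PySem.List.pyGetD food i 0) 2)
        [run] ++ ps ++ [run]) ["0"])

-- ===== PRECONDITION & SPEC =====
def Spec_solution (food : List Int) (out : String) : Prop := out = solution_alt food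
instance (food : List Int) (out : String) : Decidable (Spec_solution food out) := by unfold Spec_solution; infer_instance

-- ===== CLAIM (what is proved, stated in full; the proofs are below) =====
def Claim_equal_solution : Prop := ∀ (food : List Int), Dom_solution food → Spec_solution food (solution food)

-- ===== LEMMAS AND PROOFS =====

theorem tdiv_nonpos' (x : Int) (h : x ≤ 0) : x.tdiv 2 ≤ 0 := by
  rcases x with n | n
  · have hn : n = 0 := by simp [Int.ofNat_eq_natCast] at h; omega
    subst hn; decide
  · simp only [Int.tdiv, Int.ofNat_eq_natCast]
    omega

-- Python's int(x/2) (truncation) and x // 2 (floor) agree after clamping at 0.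
theorem tdiv_toNat_eq_floordiv_toNat (x : Int) :
    (PySem.Int.floordiv x 2).toNat = (x.tdiv 2).toNat := by
  by_cases h : 0 ≤ x
  · rw [PySem.Int.floordiv_eq_ediv_of_pos (by omega), Int.tdiv_eq_ediv_of_nonneg h]
  · have h1 : PySem.Int.floordiv x 2 < 1 := by
      rw [PySem.Int.floordiv_lt_iff_lt_mul (by omega)]; omega
    have h2 := tdiv_nonpos' x (by omega)
    omega

theorem join_nil_eq_flatten (l : List (List Char)) : PySem.Chars.join [] l = l.flatten := by
  induction l with
  | nil => rw [PySem.Chars.join_nil]; simp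
  | cons x t ih =>
    cases t with
    | nil => simp [PySem.Chars.join_singleton]
    | cons y t2 => simp only [PySem.Chars.join_cons_cons] at *; simp [ih]

-- ''.join over the flattened element list = ''.join of the per-index repeated tokens
theorem join_flatMap_replicate (r : List Int) (c : Int → Nat) (f : Int → String) :
    PySem.Str.join "" ((r.flatMap (fun i => List.replicate (c i) i)).map f)
      = PySem.Str.join "" (r.map (fun i => PySem.Str.join "" (List.replicate (c i) (f i)))) := by
  apply String.toList_inj.mp
  have he : ("" : String).toList = [] := rfl
  simp only [PySem.Str.toList_join, he, join_nil_eq_flatten, List.map_map]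
  induction r with
  | nil => simp
  | cons a t ih =>
    simp only [List.flatMap_cons, List.map_cons, List.map_append, List.flatten_cons,
      List.flatten_append, Function.comp, List.map_replicate]
    rw [ih]
    simp [PySem.Str.toList_join, he, join_nil_eq_flatten]

theorem pairwise_le_flatMap_replicate (r : List Int) (c : Int → Nat)
    (h : r.Pairwise (· < ·)) :
    (r.flatMap (fun i => List.replicate (c i) i)).Pairwise (· ≤ ·) := by
  induction r with
  | nil => simp
  | cons a t ih =>
    rcases List.pairwise_cons.mp h with ⟨ha, ht⟩
    simp only [List.flatMap_cons, List.pairwise_append]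
    refine ⟨List.pairwise_replicate.mpr (by simp), ih ht, ?_⟩
    intro x hx y hy
    rcases List.eq_of_mem_replicate hx with rfl
    rcases List.mem_flatMap.mp hy with ⟨j, hj, hyj⟩
    rcases List.eq_of_mem_replicate hyj with rfl
    exact le_of_lt (ha _ hj)

-- the stable descending sort of a nondecreasing Int list is its reversal
theorem sorted_rev_eq_reverse (xs : List Int) (h : xs.Pairwise (· ≤ ·)) :
    PySem.List.sorted xs (fun x => x) true = xs.reverse := by
  apply List.eq_of_perm_of_sorted (le := fun a b => (b:Int) ≤ a)
  · intro a b _ _ h1 h2; omega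
  · exact PySem.List.sorted_pairwise_rev xs _
  · exact List.pairwise_reverse.mpr (by simpa using h)
  · exact (PySem.List.sorted_perm xs _ true).trans (List.reverse_perm xs).symm

-- the inside-out wrapping fold builds exactly "tokens, '0', reversed tokens"
theorem foldr_wrapList (ts : List String) :
    ts.foldr (fun t ps => [t] ++ ps ++ [t]) ["0"] = ts ++ "0" :: ts.reverse := by
  induction ts with
  | nil => rfl
  | cons a t ih =>
    simp only [List.foldr_cons, ih, List.reverse_cons]
    simp

theorem join_split (ts us : List String) :
    PySem.Str.join "" (ts ++ "0" :: us)
      = PySem.Str.join "" ts ++ "0" ++ PySem.Str.join "" us := by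
  apply String.toList_inj.mp
  have he : ("" : String).toList = [] := rfl
  simp [PySem.Str.toList_join, he, join_nil_eq_flatten]

-- ===== VERDICT (by name: the statement is the Claim_ definition above) =====
theorem solution_spec : Claim_equal_solution := by
  intro food _
  unfold Spec_solution solution solution_alt
  simp only [strMul]
  rw [PySem.List.foldl_append_eq_flatMap, List.foldl_reverse]
  set r := PySem.List.pyRange 1 (food.length : Int) 1 with hr
  set c : Int → Nat := fun i => ((PySem.List.pyGetD food i 0).tdiv 2).toNat with hc
  set tok : Int → String := fun i => PySem.Str.join "" (List.replicate (c i) (PySem.Int.toStr i)) with htok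
  have hbody : (r.foldr (fun i ps =>
        [PySem.Str.join "" (List.replicate
          (PySem.Int.floordiv (PySem.List.pyGetD food i 0) 2).toNat (PySem.Int.toStr i))] ++ ps ++
        [PySem.Str.join "" (List.replicate
          (PySem.Int.floordiv (PySem.List.pyGetD food i 0) 2).toNat (PySem.Int.toStr i))]) ["0"])
      = r.foldr (fun i ps => [tok i] ++ ps ++ [tok i]) ["0"] := by
    rw [htok, hc]
    simp only [tdiv_toNat_eq_floordiv_toNat]
  rw [hbody]
  have hfr : r.foldr (fun i ps => [tok i] ++ ps ++ [tok i]) ["0"]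
      = (r.map tok).foldr (fun t ps => [t] ++ ps ++ [t]) ["0"] := by
    rw [List.foldr_map]
  rw [hfr, foldr_wrapList, join_split]
  have hpair := pairwise_le_flatMap_replicate r c
    (by rw [hr]; exact PySem.List.pairwise_lt_pyRange_one 1 (food.length : Int))
  have hsort := sorted_rev_eq_reverse _ hpair
  rw [List.nil_append, join_flatMap_replicate r c PySem.Int.toStr, hsort]
  have hrev : (r.flatMap fun i => List.replicate (c i) i).reverse
      = r.reverse.flatMap (fun i => List.replicate (c i) i) := by
    rw [List.reverse_flatMap]; simp only [Function.comp_def, List.reverse_replicate]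
  rw [hrev, join_flatMap_replicate r.reverse c PySem.Int.toStr, List.map_reverse]
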